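-- pv_equiv track=rewrite | github.com/mfascia/AdventOfCode | 2023/AoC_01.py | find_left_digit
-- ===== SOURCE A (Python) =====
-- DIGITS = ["zero", "one", "two", "three", "four", "five", "six", "seven", "eight", "nine"]
--
-- def find_left_digit(text):
-- 	for i in range(len(text)):
-- 		if text[i] in "0123456789":
-- 			return text[i]
-- 		for d in DIGITS:
-- 			if text[i:min(len(text),i+len(d))] == d:
-- 				return str(DIGITS.index(d))
-- 	return ""
-- ===== SOURCE B (Python) =====
-- DIGITS = ["zero", "one", "two", "three", "four", "five", "six", "seven", "eight", "nine"]
--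
-- def find_left_digit(text):
--     # Instead of scanning positions and testing every token at each position,
--     # compute each token's leftmost occurrence with str.find and keep the
--     # earliest one (at most one token can match at a given position).
--     candidates = [(str(i), str(i)) for i in range(10)] + [(str(i), w) for i, w in enumerate(DIGITS)]
--     best_pos, best_val = -1, ""
--     for val, tok in candidates:
--         p = text.find(tok)
--         if p != -1 and (best_pos == -1 or p < best_pos):
--             best_pos, best_val = p, val
--     return best_val
-- ===== Notes on version B (the rewrite author's own statement) =====
-- stated objective: faster
-- what changed: A scans positions left to right, slicing and testing every one of the 20 tokens at each position in Python; B instead runs one C-level str.find per token (20 linear scans total) and returns the value of the token with the smallest match position.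
import Mathlib
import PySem

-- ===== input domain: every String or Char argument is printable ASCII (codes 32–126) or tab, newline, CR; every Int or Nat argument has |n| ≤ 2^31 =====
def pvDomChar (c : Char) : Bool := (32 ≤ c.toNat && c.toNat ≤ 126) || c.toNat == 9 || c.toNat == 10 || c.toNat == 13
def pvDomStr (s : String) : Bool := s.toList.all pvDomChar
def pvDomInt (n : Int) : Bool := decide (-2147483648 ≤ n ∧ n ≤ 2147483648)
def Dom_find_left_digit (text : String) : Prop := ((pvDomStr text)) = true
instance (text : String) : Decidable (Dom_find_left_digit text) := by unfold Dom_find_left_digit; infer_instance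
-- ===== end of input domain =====

-- B replaces A's position-by-position scan (testing all 20 tokens at each index) by one
-- str.find per token, returning the value of the token with the smallest match position.

-- ===== PORT A =====
def pvDIGITS : List String := ["zero", "one", "two", "three", "four", "five", "six", "seven", "eight", "nine"]

-- inner loop `for d in DIGITS: if text[i:min(len(text),i+len(d))] == d: return str(DIGITS.index(d))`
def pvAInner (s : List Char) (i : Int) : List String → Option String
  | [] => none
  | d :: rest =>
    if PySem.List.slice s (some i) (some (min (s.length : Int) (i + PySem.Str.len d))) = d.toList
    then some (PySem.Int.toStr (((PySem.List.index? pvDIGITS d).getD 0 : Nat) : Int))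
    else pvAInner s i rest

-- outer loop `for i in range(len(text)): …`
def pvAOuter (s : List Char) : List Int → String
  | [] => ""
  | i :: rest =>
    match PySem.List.pyGet? s i with
    | none => ""   -- unreachable: i ∈ range(len(text))
    | some c =>
      if PySem.Chars.isIn [c] "0123456789".toList then String.ofList [c]
      else
        match pvAInner s i pvDIGITS with
        | some r => r
        | none => pvAOuter s rest

def find_left_digit (text : String) : String :=
  pvAOuter text.toList (PySem.List.pyRange 0 (PySem.Str.len text))

-- ===== PORT B =====
-- `[(str(i), str(i)) for i in range(10)] + [(str(i), w) for i, w in enumerate(DIGITS)]`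
def pvCANDS : List (String × String) :=
  (PySem.List.pyRange 0 10).map (fun i => (PySem.Int.toStr i, PySem.Int.toStr i)) ++
  (PySem.List.enumerate pvDIGITS).map (fun p => (PySem.Int.toStr p.1, p.2))

def find_left_digit_alt (text : String) : String :=
  (pvCANDS.foldl
    (fun (st : Int × String) vt =>
      let p := PySem.Str.find text vt.2
      if p ≠ -1 ∧ (st.1 = -1 ∨ p < st.1) then (p, vt.1) else st)
    (-1, "")).2

-- ===== PRECONDITION & SPEC =====
def Spec_find_left_digit (text : String) (out : String) : Prop := out = find_left_digit_alt text
instance (text : String) (out : String) : Decidable (Spec_find_left_digit text out) := by unfold Spec_find_left_digit; infer_instance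

-- ===== CLAIM (what is proved, stated in full; the proofs are below) =====
def Claim_equal_find_left_digit : Prop := ∀ (text : String), Dom_find_left_digit text → Spec_find_left_digit text (find_left_digit text)

-- ===== LEMMAS AND PROOFS =====

-- reference description both ports are reduced to: first matching candidate at the
-- leftmost position where any candidate token is a prefix of the remaining suffix
def pvTest (l : List Char) (vt : String × String) : Bool := l.take vt.2.toList.length == vt.2.toList

def pvM0 (l : List Char) : Option String := (pvCANDS.find? (pvTest l)).map (·.1)

def pvScan : List Char → Option (Nat × String)
  | [] => none
  | c :: rest =>
    match pvM0 (c :: rest) with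
    | some v => some (0, v)
    | none => (pvScan rest).map (fun p => (p.1 + 1, p.2))

def pvOut : Option (Nat × String) → String
  | some p => p.2
  | none => ""

lemma pvTest_iff (l : List Char) (vt : String × String) : pvTest l vt = true ↔ vt.2.toList <+: l := by
  rw [pvTest, beq_iff_eq, List.prefix_iff_eq_take]
  exact eq_comm

lemma pvM0_nil : pvM0 [] = none := by decide

lemma pvPairPrefix : ∀ vt ∈ pvCANDS, ∀ vt' ∈ pvCANDS, vt.2.toList <+: vt'.2.toList → vt = vt' := by decide

lemma pvMatch_unique (l : List Char) : ∀ vt ∈ pvCANDS, ∀ vt' ∈ pvCANDS,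
    vt.2.toList <+: l → vt'.2.toList <+: l → vt = vt' := by
  intro vt hvt vt' hvt' h h'
  rcases List.prefix_or_prefix_of_prefix h h' with hp | hp
  · exact pvPairPrefix vt hvt vt' hvt' hp
  · exact (pvPairPrefix vt' hvt' vt hvt hp).symm

lemma pvScan_some {l : List Char} {j : Nat} {v : String} (h : pvScan l = some (j, v)) :
    pvM0 (l.drop j) = some v ∧ ∀ i < j, pvM0 (l.drop i) = none := by
  induction l generalizing j v with
  | nil => simp [pvScan] at h
  | cons c rest ih =>
    rw [pvScan] at h
    cases hm : pvM0 (c :: rest) with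
    | some v' =>
      rw [hm] at h
      obtain ⟨hj, hv⟩ : (0 : Nat) = j ∧ v' = v := by
        constructor <;> [exact congrArg Prod.fst (Option.some.inj h); exact congrArg Prod.snd (Option.some.inj h)]
      subst hj; subst hv
      exact ⟨hm, by omega⟩
    | none =>
      rw [hm] at h
      simp only [Option.map_eq_some_iff] at h
      obtain ⟨⟨j', v'⟩, hrest, heq⟩ := h
      obtain ⟨hj, hv⟩ : j' + 1 = j ∧ v' = v := by
        constructor <;> [exact congrArg Prod.fst heq; exact congrArg Prod.snd heq]
      subst hj; subst hv
      obtain ⟨h1, h2⟩ := ih hrest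
      refine ⟨h1, ?_⟩
      intro i hi
      cases i with
      | zero => exact hm
      | succ i' => exact h2 i' (by omega)

lemma pvScan_none {l : List Char} (h : pvScan l = none) : ∀ i, pvM0 (l.drop i) = none := by
  induction l with
  | nil => intro i; simpa using pvM0_nil
  | cons c rest ih =>
    rw [pvScan] at h
    cases hm : pvM0 (c :: rest) with
    | some v' => rw [hm] at h; exact absurd h (by simp)
    | none =>
      rw [hm] at h
      simp only [Option.map_eq_none_iff] at h
      intro i
      cases i with
      | zero => exact hm
      | succ i' => exact ih h i' 


-- ---- A side ----
def pvVal (d : String) : String :=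
  PySem.Int.toStr (((PySem.List.index? pvDIGITS d).getD 0 : Nat) : Int)

lemma pvCANDS_lit : pvCANDS =
    [("0", "0"), ("1", "1"), ("2", "2"), ("3", "3"), ("4", "4"), ("5", "5"), ("6", "6"),
     ("7", "7"), ("8", "8"), ("9", "9"), ("0", "zero"), ("1", "one"), ("2", "two"),
     ("3", "three"), ("4", "four"), ("5", "five"), ("6", "six"), ("7", "seven"),
     ("8", "eight"), ("9", "nine")] := by decide

lemma pvCANDS_split : pvCANDS =
    (["0", "1", "2", "3", "4", "5", "6", "7", "8", "9"].map (fun t => (t, t))) ++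
      pvDIGITS.map (fun d => (pvVal d, d)) := by decide

lemma pvTake_min_trunc (u : List Char) (n k m : Nat) (hlen : u.length = n - k) (hk : k ≤ n) :
    u.take (min n (k + m) - k) = u.take m := by
  have h1 : min n (k + m) - k = min (n - k) m := by omega
  rw [h1, ← hlen]
  rcases le_total u.length m with h | h
  · rw [Nat.min_eq_left h, List.take_length, List.take_of_length_le h]
  · rw [Nat.min_eq_right h]

lemma pvInner_eq (s : List Char) (k : Nat) (hk : k ≤ s.length) : ∀ ds : List String,
    pvAInner s (k : Int) ds = (ds.find? (fun d => pvTest (s.drop k) (pvVal d, d))).map pvVal := by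
  intro ds
  induction ds with
  | nil => rfl
  | cons d rest ih =>
    rw [pvAInner]
    have hmin : min ((s.length : Nat) : Int) ((k : Int) + PySem.Str.len d) =
        ((min s.length (k + d.toList.length) : Nat) : Int) := by
      rw [PySem.Str.len_eq]
      omega
    have hcond : (PySem.List.slice s (some (k : Int))
          (some (min ((s.length : Nat) : Int) ((k : Int) + PySem.Str.len d))) = d.toList) ↔
        ((s.drop k).take d.toList.length = d.toList) := by
      rw [hmin, PySem.List.slice_natCast,
        pvTake_min_trunc (s.drop k) s.length k d.toList.length (List.length_drop) hk]
    by_cases hc : (s.drop k).take d.toList.length = d.toList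
    · rw [if_pos (hcond.mpr hc)]
      have htest : pvTest (s.drop k) (pvVal d, d) = true := by
        rw [pvTest]; exact beq_iff_eq.mpr hc
      rw [List.find?_cons_of_pos (p := fun d => pvTest (List.drop k s) (pvVal d, d)) (htest)]
      rfl
    · rw [if_neg (fun h => hc (hcond.mp h))]
      have htest : pvTest (s.drop k) (pvVal d, d) = false := by
        rw [pvTest]; exact beq_eq_false_iff_ne.mpr hc
      rw [List.find?_cons_of_neg (p := fun d => pvTest (List.drop k s) (pvVal d, d)) (by simp [htest])]
      exact ih

lemma pvM0_digit {c : Char} (hmem : c ∈ "0123456789".toList) (t : List Char) :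
    pvM0 (c :: t) = some (String.ofList [c]) := by
  rw [show "0123456789".toList = ['0', '1', '2', '3', '4', '5', '6', '7', '8', '9'] from by decide] at hmem
  fin_cases hmem <;> simp [pvM0, pvCANDS_lit, pvTest, List.find?]

lemma pvM0_nondigit {c : Char} (hmem : c ∉ "0123456789".toList) (t : List Char) :
    pvM0 (c :: t) = ((pvDIGITS.find? (fun d => pvTest (c :: t) (pvVal d, d))).map pvVal) := by
  rw [pvM0, pvCANDS_split, List.find?_append]
  have hdnone : (["0", "1", "2", "3", "4", "5", "6", "7", "8", "9"].map
      (fun t => (t, t))).find? (pvTest (c :: t)) = none := by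
    rw [List.find?_eq_none]
    intro vt hvt
    simp only [List.map, List.mem_cons, List.not_mem_nil, or_false] at hvt
    rcases hvt with h | h | h | h | h | h | h | h | h | h <;>
      · subst h
        rw [Bool.not_eq_true, ← Bool.not_eq_true, pvTest_iff]
        intro hpre
        rcases List.cons_prefix_cons.mp hpre with ⟨rfl, -⟩
        exact hmem (by decide)
  rw [hdnone, Option.none_or, List.find?_map, Option.map_map]
  rfl

lemma pvOut_map_shift (o : Option (Nat × String)) :
    pvOut (o.map (fun p => (p.1 + 1, p.2))) = pvOut o := by
  cases o <;> rfl

lemma pvLA_loop : ∀ (l s : List Char) (k : Nat), s.drop k = l →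
    pvAOuter s (PySem.List.pyRange (k : Int) (s.length : Int)) = pvOut (pvScan l) := by
  intro l
  induction l with
  | nil =>
    intro s k hdrop
    rw [List.drop_eq_nil_iff] at hdrop
    rw [PySem.List.pyRange_one_eq_nil (by exact_mod_cast hdrop)]
    rfl
  | cons c rest ih =>
    intro s k hdrop
    have hlen := congrArg List.length hdrop
    simp only [List.length_drop, List.length_cons] at hlen
    have hk : k < s.length := by omega
    rw [PySem.List.pyRange_one_cons (by exact_mod_cast hk)]
    have hget : PySem.List.pyGet? s (k : Int) = some c := by
      rw [PySem.List.pyGet?_natCast, ← List.head?_drop, hdrop]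
      rfl
    simp only [pvAOuter, hget]
    by_cases hdig : PySem.Chars.isIn [c] "0123456789".toList = true
    · rw [if_pos hdig]
      have hmem : c ∈ "0123456789".toList := by
        rw [← List.singleton_infix_iff, ← PySem.Chars.isIn_iff_infix]
        exact hdig
      rw [pvScan, pvM0_digit hmem rest]
      rfl
    · rw [if_neg hdig]
      have hmem : c ∉ "0123456789".toList := by
        rw [← List.singleton_infix_iff, ← PySem.Chars.isIn_iff_infix]
        exact hdig
      have hinner := pvInner_eq s k (le_of_lt hk) pvDIGITS
      rw [hdrop] at hinner
      rw [hinner, ← pvM0_nondigit hmem rest]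
      cases hM0v : pvM0 (c :: rest) with
      | some r => rw [pvScan, hM0v]; rfl
      | none =>
        rw [pvScan, hM0v]
        have hcast : (k : Int) + 1 = ((k + 1 : Nat) : Int) := by push_cast; ring
        have hdrop' : s.drop (k + 1) = rest := by
          have : s.drop (k + 1) = (s.drop k).drop 1 := by rw [List.drop_drop]
          rw [this, hdrop]
          rfl
        rw [hcast, ih s (k + 1) hdrop', pvOut_map_shift]

lemma pvLA (text : String) : find_left_digit text = pvOut (pvScan text.toList) := by
  rw [find_left_digit, PySem.Str.len_eq]
  have h0 : (0 : Int) = ((0 : Nat) : Int) := rfl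
  rw [h0, pvLA_loop text.toList text.toList 0 List.drop_zero]



-- ---- B side ----
def pvStep (s : List Char) (st : Int × String) (vt : String × String) : Int × String :=
  if PySem.Chars.find s vt.2.toList ≠ -1 ∧ (st.1 = -1 ∨ PySem.Chars.find s vt.2.toList < st.1)
  then (PySem.Chars.find s vt.2.toList, vt.1) else st

lemma pvAlt_eq_fold (text : String) :
    find_left_digit_alt text = (pvCANDS.foldl (pvStep text.toList) (-1, "")).2 := rfl

lemma pvM0_eq_some {l : List Char} {v : String} (h : pvM0 l = some v) :
    ∃ vt ∈ pvCANDS, vt.1 = v ∧ vt.2.toList <+: l ∧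
      ∀ vt' ∈ pvCANDS, vt'.2.toList <+: l → vt' = vt := by
  unfold pvM0 at h
  rw [Option.map_eq_some_iff] at h
  obtain ⟨vt, hfind, hv⟩ := h
  have hmem := List.mem_of_find?_eq_some hfind
  have htest := List.find?_some hfind
  have hpre := (pvTest_iff l vt).mp htest
  exact ⟨vt, hmem, hv, hpre, fun vt' hvt' hpre' => pvMatch_unique l vt' hvt' vt hmem hpre' hpre⟩

lemma pvM0_eq_none {l : List Char} (h : pvM0 l = none) :
    ∀ vt ∈ pvCANDS, ¬ vt.2.toList <+: l := by
  unfold pvM0 at h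
  rw [Option.map_eq_none_iff, List.find?_eq_none] at h
  intro vt hvt hpre
  exact h vt hvt ((pvTest_iff l vt).mpr hpre)

lemma pvFold_stay (s : List Char) (j : Nat) (v' : String) :
    ∀ cs : List (String × String),
    (∀ vt ∈ cs, PySem.Chars.find s vt.2.toList = -1 ∨ (j : Int) ≤ PySem.Chars.find s vt.2.toList) →
    cs.foldl (pvStep s) ((j : Int), v') = ((j : Int), v') := by
  intro cs
  induction cs with
  | nil => intro _; rfl
  | cons c rest ih =>
    intro h
    have hc := h c (by simp)
    have hstep : pvStep s ((j : Int), v') c = ((j : Int), v') := by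
      unfold pvStep
      rw [if_neg]
      rintro ⟨h1, h2⟩
      rcases h2 with h2 | h2
      · omega
      · rcases hc with hc | hc
        · exact h1 hc
        · omega
    rw [List.foldl_cons, hstep]
    exact ih (fun vt hvt => h vt (by simp [hvt]))

lemma pvFold_none (s : List Char) :
    ∀ (cs : List (String × String)) (st : Int × String),
    (∀ vt ∈ cs, PySem.Chars.find s vt.2.toList = -1) →
    cs.foldl (pvStep s) st = st := by
  intro cs
  induction cs with
  | nil => intro _ _; rfl
  | cons c rest ih =>
    intro st h
    have hstep : pvStep s st c = st := by
      unfold pvStep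
      rw [if_neg]
      rintro ⟨h1, _⟩
      exact h1 (h c (by simp))
    rw [List.foldl_cons, hstep]
    exact ih st (fun vt hvt => h vt (by simp [hvt]))

lemma pvFold_main (s : List Char) (j : Nat) (v : String) :
    ∀ (cs : List (String × String)) (st : Int × String),
    (∀ vt ∈ cs, PySem.Chars.find s vt.2.toList = -1 ∨ (j : Int) ≤ PySem.Chars.find s vt.2.toList) →
    (∀ vt ∈ cs, PySem.Chars.find s vt.2.toList = (j : Int) → vt.1 = v) →
    (∃ vt ∈ cs, PySem.Chars.find s vt.2.toList = (j : Int)) →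
    (st.1 = -1 ∨ (j : Int) < st.1) →
    cs.foldl (pvStep s) st = ((j : Int), v) := by
  intro cs
  induction cs with
  | nil => rintro st _ _ ⟨vt, hvt, _⟩ _; simp at hvt
  | cons c rest ih =>
    intro st h1 h2 h3 hst
    by_cases hcj : PySem.Chars.find s c.2.toList = (j : Int)
    · have hstep : pvStep s st c = ((j : Int), c.1) := by
        unfold pvStep
        rw [if_pos]
        · rw [hcj]
        · exact ⟨by omega, by rcases hst with h | h; exact Or.inl h; exact Or.inr (by omega)⟩
      rw [List.foldl_cons, hstep, h2 c (by simp) hcj]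
      exact pvFold_stay s j v rest (fun vt hvt => h1 vt (by simp [hvt]))
    · have hinv : (pvStep s st c).1 = -1 ∨ (j : Int) < (pvStep s st c).1 := by
        unfold pvStep
        split
        · rename_i hcond
          have := h1 c (by simp)
          right
          rcases this with h | h
          · exact absurd h hcond.1
          · simpa using lt_of_le_of_ne h (Ne.symm hcj)
        · exact hst
      rw [List.foldl_cons]
      apply ih _ (fun vt hvt => h1 vt (by simp [hvt])) (fun vt hvt => h2 vt (by simp [hvt])) _ hinv
      obtain ⟨vt, hvt, hfind⟩ := h3
      rcases List.mem_cons.mp hvt with rfl | hvt'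
      · exact absurd hfind hcj
      · exact ⟨vt, hvt', hfind⟩

lemma pvLB (text : String) : find_left_digit_alt text = pvOut (pvScan text.toList) := by
  rw [pvAlt_eq_fold]
  cases hscan : pvScan text.toList with
  | none =>
    have hnone : ∀ vt ∈ pvCANDS, PySem.Chars.find text.toList vt.2.toList = -1 := by
      intro vt hvt
      rw [PySem.Chars.find_eq_neg_one_iff]
      intro hinf
      obtain ⟨i, hpre⟩ := (PySem.Chars.exists_prefix_drop_iff_isIn _ _).mpr
        ((PySem.Chars.isIn_iff_infix _ _).mpr hinf)
      exact pvM0_eq_none (pvScan_none hscan i) vt hvt hpre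
    rw [pvFold_none text.toList pvCANDS _ hnone]
    rfl
  | some p =>
    obtain ⟨j, v⟩ := p
    obtain ⟨hM0, hbelow⟩ := pvScan_some hscan
    obtain ⟨vt0, hvt0, hval0, hpre0, huniq⟩ := pvM0_eq_some hM0
    have hnoneAt : ∀ i < j, ∀ vt ∈ pvCANDS, ¬ vt.2.toList <+: text.toList.drop i :=
      fun i hi => pvM0_eq_none (hbelow i hi)
    -- each candidate matches nowhere below j
    have hgen : ∀ vt ∈ pvCANDS, PySem.Chars.find text.toList vt.2.toList = -1 ∨
        ((j : Int) ≤ PySem.Chars.find text.toList vt.2.toList ∧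
         vt.2.toList <+: text.toList.drop (PySem.Chars.find text.toList vt.2.toList).toNat) := by
      intro vt hvt
      by_cases hne : PySem.Chars.find text.toList vt.2.toList = -1
      · exact Or.inl hne
      · right
        have hge : 0 ≤ PySem.Chars.find text.toList vt.2.toList := by
          have := PySem.Chars.neg_one_le_find text.toList vt.2.toList
          omega
        obtain ⟨hfp, _⟩ := PySem.Chars.find_spec hge
        constructor
        · by_contra hlt
          push Not at hlt
          have hjn : (PySem.Chars.find text.toList vt.2.toList).toNat < j := by omega
          exact hnoneAt _ hjn vt hvt hfp
        · exact hfp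
    have hfind0 : PySem.Chars.find text.toList vt0.2.toList = (j : Int) := by
      have hinf : vt0.2.toList <:+: text.toList := by
        rw [← PySem.Chars.isIn_iff_infix, ← PySem.Chars.exists_prefix_drop_iff_isIn]
        exact ⟨j, hpre0⟩
      have hne : PySem.Chars.find text.toList vt0.2.toList ≠ -1 :=
        (PySem.Chars.find_ne_neg_one_iff _ _).mpr hinf
      have hge : 0 ≤ PySem.Chars.find text.toList vt0.2.toList := by
        have := PySem.Chars.neg_one_le_find text.toList vt0.2.toList
        omega
      obtain ⟨hfp, hfmin⟩ := PySem.Chars.find_spec hge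
      rcases hgen vt0 hvt0 with h | ⟨hle, _⟩
      · exact absurd h hne
      · have : ¬ j < (PySem.Chars.find text.toList vt0.2.toList).toNat := fun hlt => hfmin j hlt hpre0
        omega
    have hfold : pvCANDS.foldl (pvStep text.toList) (-1, "") = ((j : Int), v) := by
      apply pvFold_main text.toList j v pvCANDS (-1, "")
      · intro vt hvt
        rcases hgen vt hvt with h | ⟨hle, _⟩
        · exact Or.inl h
        · exact Or.inr hle
      · intro vt hvt hfind
        rcases hgen vt hvt with h | ⟨_, hpre⟩
        · omega
        · rw [hfind] at hpre
          simp only [Int.toNat_natCast] at hpre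
          rw [huniq vt hvt hpre, hval0]
      · exact ⟨vt0, hvt0, hfind0⟩
      · exact Or.inl rfl
    rw [hfold]
    rfl


-- ===== VERDICT (by name: the statement is the Claim_ definition above) =====
theorem find_left_digit_spec : Claim_equal_find_left_digit := by
  intro text _
  unfold Spec_find_left_digit
  rw [pvLA, pvLB]
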